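-- pv_equiv track=rewrite | github.com/golanghack/programming_pro | tasks/yield.py | foo
-- ===== SOURCE A (Python) =====
-- def foo(arr1, arr2):
--     zone = []
--     zone2=[]
--     for i1, a1 in enumerate(arr1):
--         for i2, a2 in enumerate(arr2):
--             if a2 - a1<0:
--                 zone.append(i1)
--                 zone2.append(i2)
--                 break
--
--     yield zone
--     yield zone2
-- ===== SOURCE B (Python) =====
-- def foo(arr1, arr2):
--     # prefix-min of arr2 (non-increasing), then binary search per arr1 element
--     pm = []
--     cur = None
--     for v in arr2:
--         if cur is None or v < cur:
--             cur = v
--         pm.append(cur)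
--     m = len(pm)
--     zone = []
--     zone2 = []
--     for i1, a1 in enumerate(arr1):
--         lo, hi = 0, m
--         while lo < hi:
--             mid = (lo + hi) // 2
--             if pm[mid] < a1:
--                 hi = mid
--             else:
--                 lo = mid + 1
--         if lo < m:
--             zone.append(i1)
--             zone2.append(lo)
--     yield zone
--     yield zone2
-- ===== Notes on version B (the rewrite author's own statement) =====
-- stated objective: faster
-- what changed: Replaced the per-element linear scan of arr2 by a precomputed prefix-minimum array of arr2 (non-increasing) plus a hand-written binary search per arr1 element for the first index whose prefix-min is below the element.
import Mathlib
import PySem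

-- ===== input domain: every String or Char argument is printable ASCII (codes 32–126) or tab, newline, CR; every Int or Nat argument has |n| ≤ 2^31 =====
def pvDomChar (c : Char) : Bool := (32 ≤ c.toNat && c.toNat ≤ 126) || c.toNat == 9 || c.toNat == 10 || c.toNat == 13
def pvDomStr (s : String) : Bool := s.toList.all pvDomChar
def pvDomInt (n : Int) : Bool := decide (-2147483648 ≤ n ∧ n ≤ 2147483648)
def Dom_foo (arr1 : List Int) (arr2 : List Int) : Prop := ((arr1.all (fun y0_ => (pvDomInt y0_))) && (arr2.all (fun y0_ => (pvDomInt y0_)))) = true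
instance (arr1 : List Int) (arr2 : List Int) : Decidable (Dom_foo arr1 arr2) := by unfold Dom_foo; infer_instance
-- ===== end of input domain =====

-- B replaces A's per-element linear scan of arr2 by a prefix-minimum array plus a binary
-- search per arr1 element (objective: faster, O(n*m) -> O((n+m) log m)).
-- Both ports compare the generator's yielded values [zone, zone2]; neither program mutates its arguments.

-- ===== PORT A =====
-- inner `for i2, a2 in enumerate(arr2): if a2 - a1 < 0: ... break`
def fooInner : List (Int × Int) → Int → Option Int
  | [], _ => none
  | (i2, a2) :: rest, a1 => if a2 - a1 < 0 then some i2 else fooInner rest a1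

def foo (arr1 : List Int) (arr2 : List Int) : List (List Int) :=
  let st := (PySem.List.enumerate arr1).foldl
    (fun (st : List Int × List Int) p =>
      match fooInner (PySem.List.enumerate arr2) p.2 with
      | some i2 => (st.1 ++ [p.1], st.2 ++ [i2])
      | none => st) ([], [])
  [st.1, st.2]

-- ===== PORT B =====
-- prefix-minimum of arr2 with running `cur` (None at the start)
def prefMin : List Int → Option Int → List Int
  | [], _ => []
  | v :: rest, cur =>
    let c := match cur with
      | none => v
      | some c0 => if v < c0 then v else c0
    c :: prefMin rest (some c)

-- `while lo < hi: mid = (lo+hi)//2; ...`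
def bsearch (pm : List Int) (a1 : Int) (lo hi : Nat) : Nat :=
  if h : lo < hi then
    let mid := (lo + hi) / 2
    if pm.getD mid 0 < a1 then bsearch pm a1 lo mid
    else bsearch pm a1 (mid + 1) hi
  else lo
termination_by hi - lo
decreasing_by all_goals omega

def foo_alt (arr1 : List Int) (arr2 : List Int) : List (List Int) :=
  let pm := prefMin arr2 none
  let m := pm.length
  let st := (PySem.List.enumerate arr1).foldl
    (fun (st : List Int × List Int) p =>
      let lo := bsearch pm p.2 0 m
      if lo < m then (st.1 ++ [p.1], st.2 ++ [(lo : Int)]) else st)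
    ([], [])
  [st.1, st.2]

-- ===== PRECONDITION & SPEC =====
def Spec_foo (arr1 : List Int) (arr2 : List Int) (out : List (List Int)) : Prop := out = foo_alt arr1 arr2
instance (arr1 : List Int) (arr2 : List Int) (out : List (List Int)) : Decidable (Spec_foo arr1 arr2 out) := by unfold Spec_foo; infer_instance

-- ===== CLAIM (what is proved, stated in full; the proofs are below) =====
def Claim_equal_foo : Prop := ∀ (arr1 : List Int) (arr2 : List Int), Dom_foo arr1 arr2 → Spec_foo arr1 arr2 (foo arr1 arr2)

-- ===== LEMMAS AND PROOFS =====

-- reference "first index of arr2 strictly below a"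
def firstLt : List Int → Int → Option Nat
  | [], _ => none
  | x :: rest, a => if x < a then some 0 else (firstLt rest a).map (· + 1)

theorem fooInner_enum (l : List Int) (s : Int) (a : Int) :
    fooInner (PySem.List.enumerate l s) a = (firstLt l a).map (fun k => s + (k : Int)) := by
  induction l generalizing s with
  | nil => simp [PySem.List.enumerate_nil, fooInner, firstLt]
  | cons x rest ih =>
      rw [PySem.List.enumerate_cons]
      by_cases h : x < a
      · simp [fooInner, firstLt, h, show x - a < 0 by omega]
      · simp only [fooInner, firstLt, if_neg (show ¬ x - a < 0 by omega), if_neg h, ih]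
        cases firstLt rest a with
        | none => simp
        | some k => simp; ring

theorem prefMin_length (l : List Int) (c : Option Int) : (prefMin l c).length = l.length := by
  induction l generalizing c with
  | nil => simp [prefMin]
  | cons v rest ih => simp [prefMin, ih]

theorem prefMin_lt_some (a : Int) (l : List Int) (c : Int) (i : Nat) (hi : i < l.length) :
    ((prefMin l (some c)).getD i 0 < a ↔ (c < a ∨ ∃ j, j ≤ i ∧ l.getD j 0 < a)) := by
  induction l generalizing c i with
  | nil => simp at hi
  | cons v rest ih =>
      simp only [prefMin]
      cases i with
      | zero =>
          constructor
          · intro h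
            by_cases hv : v < c
            · simp [hv] at h; right; exact ⟨0, le_refl 0, by simpa using h⟩
            · simp [hv] at h; left; exact h
          · rintro (h | ⟨j, hj, hlt⟩)
            · by_cases hv : v < c <;> simp [hv] <;> omega
            · interval_cases j
              by_cases hv : v < c <;> simp [hv] <;> simp at hlt <;> omega
      | succ k =>
          have hk : k < rest.length := by simpa using hi
          simp only [List.getD_cons_succ]
          rw [ih _ k hk]
          constructor
          · rintro (h | ⟨j, hj, hlt⟩)
            · by_cases hv : v < c
              · simp [hv] at h
                right; exact ⟨0, Nat.zero_le _, by simpa using h⟩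
              · simp [hv] at h
                left; exact h
            · right; exact ⟨j + 1, by omega, by simpa using hlt⟩
          · rintro (h | ⟨j, hj, hlt⟩)
            · by_cases hv : v < c <;> simp [hv] <;> omega
            · cases j with
              | zero =>
                  left
                  by_cases hv : v < c <;> simp [hv] <;> simp at hlt <;> omega
              | succ j' => right; exact ⟨j', by omega, by simpa using hlt⟩

theorem prefMin_lt (a : Int) (l : List Int) (i : Nat) (hi : i < l.length) :
    ((prefMin l none).getD i 0 < a ↔ ∃ j, j ≤ i ∧ l.getD j 0 < a) := by
  cases l with
  | nil => simp at hi
  | cons v rest =>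
      simp only [prefMin]
      cases i with
      | zero =>
          constructor
          · intro h; exact ⟨0, le_refl 0, by simpa using h⟩
          · rintro ⟨j, hj, hlt⟩; interval_cases j; simpa using hlt
      | succ k =>
          have hk : k < rest.length := by simpa using hi
          simp only [List.getD_cons_succ]
          rw [prefMin_lt_some a rest v k hk]
          constructor
          · rintro (h | ⟨j, hj, hlt⟩)
            · exact ⟨0, Nat.zero_le _, by simpa using h⟩
            · exact ⟨j + 1, by omega, by simpa using hlt⟩
          · rintro ⟨j, hj, hlt⟩
            cases j with
            | zero => left; simpa using hlt
            | succ j' => right; exact ⟨j', by omega, by simpa using hlt⟩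

theorem bsearch_spec (pm : List Int) (a : Int) (lo hi : Nat)
    (hhi : hi ≤ pm.length) (hlohi : lo ≤ hi)
    (up : ∀ i j, i ≤ j → j < pm.length → pm.getD i 0 < a → pm.getD j 0 < a)
    (H1 : ∀ j, j < lo → ¬ pm.getD j 0 < a)
    (H2 : ∀ j, hi ≤ j → j < pm.length → pm.getD j 0 < a) :
    bsearch pm a lo hi ≤ hi ∧
    (∀ j, j < bsearch pm a lo hi → ¬ pm.getD j 0 < a) ∧
    (bsearch pm a lo hi < pm.length → pm.getD (bsearch pm a lo hi) 0 < a) := by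
  fun_induction bsearch pm a lo hi with
  | case1 lo hi h mid hlt ih =>
      have hmid : mid = (lo + hi) / 2 := rfl
      have H2' : ∀ j, mid ≤ j → j < pm.length → pm.getD j 0 < a :=
        fun j hj hjl => up mid j hj hjl hlt
      obtain ⟨ha, hb, hc⟩ := ih (by omega) (by omega) H1 H2'
      exact ⟨by omega, hb, hc⟩
  | case2 lo hi h mid hlt ih =>
      have hmid : mid = (lo + hi) / 2 := rfl
      have H1' : ∀ j, j < mid + 1 → ¬ pm.getD j 0 < a :=
        fun j hj hja => hlt (up j mid (by omega) (by omega) hja)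
      exact ih hhi (by omega) H1' H2
  | case3 lo hi h =>
      exact ⟨by omega, H1, fun hlen => H2 lo (by omega) hlen⟩

theorem firstLt_eq_none (l : List Int) (a : Int)
    (h : ∀ j, j < l.length → ¬ l.getD j 0 < a) : firstLt l a = none := by
  induction l with
  | nil => rfl
  | cons x rest ih =>
      have hx : ¬ x < a := by simpa using h 0 (by simp)
      simp only [firstLt, if_neg hx]
      rw [ih (fun j hj => by simpa using h (j + 1) (by simpa using hj))]
      rfl

theorem firstLt_eq_some (l : List Int) (a : Int) (k : Nat) (hk : k < l.length)
    (hlt : l.getD k 0 < a) (hmin : ∀ j, j < k → ¬ l.getD j 0 < a) :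
    firstLt l a = some k := by
  induction l generalizing k with
  | nil => simp at hk
  | cons x rest ih =>
      cases k with
      | zero => simp only [firstLt, if_pos (by simpa using hlt)]
      | succ k' =>
          have hx : ¬ x < a := by simpa using hmin 0 (by omega)
          simp only [firstLt, if_neg hx]
          rw [ih k' (by simpa using hk) (by simpa using hlt)
            (fun j hj => by simpa using hmin (j + 1) (by omega))]
          rfl

theorem main_lemma (arr2 : List Int) (a : Int) :
    (firstLt arr2 a) =
      (if bsearch (prefMin arr2 none) a 0 (prefMin arr2 none).length < (prefMin arr2 none).length
        then some (bsearch (prefMin arr2 none) a 0 (prefMin arr2 none).length) else none) := by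
  set pm := prefMin arr2 none with hpm
  have hlen : pm.length = arr2.length := prefMin_length arr2 none
  have up : ∀ i j, i ≤ j → j < pm.length → pm.getD i 0 < a → pm.getD j 0 < a := by
    intro i j hij hj hi
    obtain ⟨j', hj', hlt'⟩ := (prefMin_lt a arr2 i (by omega)).mp hi
    exact (prefMin_lt a arr2 j (by omega)).mpr ⟨j', by omega, hlt'⟩
  obtain ⟨hle, hall, hr⟩ := bsearch_spec pm a 0 pm.length (le_refl _) (Nat.zero_le _) up
    (fun j hj => absurd hj (by omega)) (fun j hj hjl => absurd hjl (by omega))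
  set r := bsearch pm a 0 pm.length with hrdef
  have harr_not : ∀ j, j < r → ¬ arr2.getD j 0 < a := by
    intro j hj hja
    exact hall j hj ((prefMin_lt a arr2 j (by omega)).mpr ⟨j, le_refl _, hja⟩)
  by_cases hcase : r < pm.length
  · rw [if_pos hcase]
    obtain ⟨j', hj', hlt'⟩ := (prefMin_lt a arr2 r (by omega)).mp (hr hcase)
    have hjr : j' = r := by
      by_contra hne
      exact harr_not j' (by omega) hlt'
    exact firstLt_eq_some arr2 a r (by omega) (hjr ▸ hlt') harr_not
  · rw [if_neg hcase]
    exact firstLt_eq_none arr2 a (fun j hj => harr_not j (by omega))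

theorem foo_eq_alt (arr1 arr2 : List Int) : foo arr1 arr2 = foo_alt arr1 arr2 := by
  simp only [foo, foo_alt]
  have hstep :
      (fun (st : List Int × List Int) (p : Int × Int) =>
        match fooInner (PySem.List.enumerate arr2) p.2 with
        | some i2 => (st.1 ++ [p.1], st.2 ++ [i2])
        | none => st)
      = (fun (st : List Int × List Int) (p : Int × Int) =>
          let lo := bsearch (prefMin arr2 none) p.2 0 (prefMin arr2 none).length
          if lo < (prefMin arr2 none).length then (st.1 ++ [p.1], st.2 ++ [(lo : Int)]) else st) := by
    funext st p
    have henum : PySem.List.enumerate arr2 = PySem.List.enumerate arr2 0 := rfl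
    rw [henum, fooInner_enum arr2 0 p.2, main_lemma arr2 p.2]
    by_cases h : bsearch (prefMin arr2 none) p.2 0 (prefMin arr2 none).length < (prefMin arr2 none).length
    · simp [h]
    · simp [h]
  rw [hstep]

-- ===== VERDICT (by name: the statement is the Claim_ definition above) =====
theorem foo_spec : Claim_equal_foo := by
  intro arr1 arr2 _
  unfold Spec_foo
  exact foo_eq_alt arr1 arr2
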